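-- pv_equiv track=rewrite | github.com/quantstamp/l2-compression | experiments/table3.py | count_zero_runs
-- ===== SOURCE A (Python) =====
-- def count_zero_runs(string):
--     current_run = 0
--     totals=[]
--     for char in string:
--         if char == '0':
--             current_run += 1
--         else:
--             if current_run > 0:
--                 totals.append(current_run)
--                 current_run = 0
--
--     return totals
-- ===== SOURCE B (Python) =====
-- def count_zero_runs(string):
--     totals = []
--     n = len(string)
--     i = string.find('0')
--     while i != -1:
--         j = i
--         while j < n and string[j] == '0':
--             j += 1
--         if j < n:
--             totals.append(j - i)
--         i = string.find('0', j)
--     return totals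
-- ===== Notes on version B (the rewrite author's own statement) =====
-- stated objective: faster
-- what changed: Replaces the per-character state-machine accumulator with a run-jumping scan: str.find('0', j) jumps to the start of each maximal zero run at C speed, an inner pointer measures the run, and the run is kept only when a character follows it.
import Mathlib
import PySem

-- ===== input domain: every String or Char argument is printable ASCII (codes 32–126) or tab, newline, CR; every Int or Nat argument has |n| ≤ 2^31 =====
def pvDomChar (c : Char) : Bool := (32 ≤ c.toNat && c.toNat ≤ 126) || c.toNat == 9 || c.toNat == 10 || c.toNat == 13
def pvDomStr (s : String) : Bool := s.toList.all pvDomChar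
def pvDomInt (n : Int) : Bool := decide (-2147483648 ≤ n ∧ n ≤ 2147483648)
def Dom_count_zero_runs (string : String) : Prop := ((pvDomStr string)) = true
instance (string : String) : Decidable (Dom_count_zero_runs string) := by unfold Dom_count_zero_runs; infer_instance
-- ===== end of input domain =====

-- B replaces A's per-character run accumulator by a run-jumping scan (str.find('0', j)
-- jumps between maximal zero runs, measured faster by a constant factor); return values proved equal.

-- ===== PORT A =====
-- A: loop over the characters carrying (current_run, totals).
def pvAStep (p : Int × List Int) (c : Char) : Int × List Int :=
  if c = '0' then (p.1 + 1, p.2)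
  else if p.1 > 0 then (0, p.2 ++ [p.1]) else p

def count_zero_runs (string : String) : List Int :=
  (string.toList.foldl pvAStep (0, [])).2

-- ===== PORT B =====
-- B's run-jumping loop: `string.find('0', j)` is `dropWhile (· ≠ '0')` on the remaining
-- suffix, the inner `while string[j] == '0'` is `takeWhile (· = '0')`, `j < n` is
-- "the suffix after the run is nonempty", and `j - i` is the run's length.
def pvBRun (l : List Char) : List Int :=
  match h : l.dropWhile (· ≠ '0') with
  | [] => []
  | c :: t =>
    let after := (c :: t).dropWhile (· = '0')
    if after = [] then []
    else (((c :: t).takeWhile (· = '0')).length : Int) :: pvBRun after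
termination_by l.length
decreasing_by
  have hc : c = '0' := by
    have hh := List.head?_dropWhile_not (fun x => decide (¬ x = '0')) l
    rw [h] at hh; simpa using hh
  have h1 : (c :: t).length ≤ l.length := by
    have hle := List.length_dropWhile_le (fun x => decide (¬ x = '0')) l
    rw [h] at hle; exact hle
  have h2 : ((c :: t).dropWhile (· = '0')).length ≤ t.length := by
    simp only [List.dropWhile_cons, hc, decide_true, if_true]
    exact List.length_dropWhile_le _ t
  simp only [List.length_cons] at h1
  omega

def count_zero_runs_alt (string : String) : List Int := pvBRun string.toList

-- ===== PRECONDITION & SPEC =====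
def Spec_count_zero_runs (string : String) (out : List Int) : Prop := out = count_zero_runs_alt string
instance (string : String) (out : List Int) : Decidable (Spec_count_zero_runs string out) := by unfold Spec_count_zero_runs; infer_instance

-- ===== CLAIM (what is proved, stated in full; the proofs are below) =====
def Claim_equal_count_zero_runs : Prop := ∀ (string : String), Dom_count_zero_runs string → Spec_count_zero_runs string (count_zero_runs string)

-- ===== LEMMAS AND PROOFS =====

-- reference function: the runs emitted when processing l with k pending zeros
def pvG (k : Nat) : List Char → List Int
  | [] => []
  | c :: t => if c = '0' then pvG (k + 1) t
              else (if 0 < k then [(k : Int)] else []) ++ pvG 0 t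

theorem pvA_inv (l : List Char) : ∀ (k : Nat) (acc : List Int),
    (l.foldl pvAStep ((k : Int), acc)).2 = acc ++ pvG k l := by
  induction l with
  | nil => intro k acc; simp [pvG]
  | cons c t ih =>
    intro k acc
    by_cases hc : c = '0'
    · subst hc
      simpa [List.foldl_cons, pvAStep, pvG] using ih (k + 1) acc
    · rcases Nat.eq_zero_or_pos k with hk | hk
      · subst hk
        simp only [List.foldl_cons, pvAStep, Nat.cast_zero,
          show ¬((0 : Int) > 0) by omega, pvG, if_neg hc]
        simpa using ih 0 acc
      · have hki : ((k : Int) > 0) := by exact_mod_cast hk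
        simp only [List.foldl_cons, pvAStep, if_neg hc, if_pos hki]
        have h0 := ih 0 (acc ++ [(k : Int)])
        simp only [Nat.cast_zero] at h0
        rw [h0]
        simp [pvG, hc, hk]

theorem pvG_split (l : List Char) : ∀ (k : Nat),
    pvG k l =
      match l.dropWhile (· = '0') with
      | [] => []
      | _ :: t' => (if 0 < k + (l.takeWhile (· = '0')).length
                    then [((k : Int) + (l.takeWhile (· = '0')).length)] else []) ++ pvG 0 t' := by
  induction l with
  | nil => intro k; simp [pvG]
  | cons c t ih =>
    intro k
    by_cases hc : c = '0'
    · subst hc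
      have hrec := ih (k + 1)
      simp only [pvG, List.dropWhile_cons, List.takeWhile_cons, decide_true, if_true]
      rw [hrec]
      cases hdw : t.dropWhile (fun c => decide (c = '0')) with
      | nil => rfl
      | cons x t' =>
        have h1 : 0 < k + 1 + (t.takeWhile (fun c => decide (c = '0'))).length := by omega
        simp only [if_pos h1, List.length_cons]
        push_cast
        rw [if_pos (by omega)]
        simp only [List.cons_append, List.nil_append, List.cons.injEq]
        exact ⟨by ring, trivial⟩
    · simp [pvG, hc]

theorem pvG_skip (l : List Char) : pvG 0 l = pvG 0 (l.dropWhile (· ≠ '0')) := by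
  induction l with
  | nil => rfl
  | cons c t ih =>
    by_cases hc : c = '0'
    · simp [hc]
    · simp [pvG, hc, ih]

theorem pvB_eq_pvG (n : Nat) : ∀ (l : List Char), l.length ≤ n → pvBRun l = pvG 0 l := by
  induction n with
  | zero =>
    intro l hl
    have hnil : l = [] := by cases l with | nil => rfl | cons a b => simp at hl
    subst hnil; simp [pvBRun]; rfl
  | succ n ih =>
    intro l hl
    rw [pvBRun, pvG_skip]
    cases h : l.dropWhile (· ≠ '0') with
    | nil => rfl
    | cons c t =>
      have hc : c = '0' := by
        have hh := List.head?_dropWhile_not (fun x => decide (¬ x = '0')) l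
        rw [h] at hh; simpa using hh
      subst hc
      have h1 : t.length + 1 ≤ l.length := by
        have hle := List.length_dropWhile_le (fun x => decide (¬ x = '0')) l
        rw [h] at hle; simpa using hle
      rw [pvG_split]
      simp only [List.dropWhile_cons, List.takeWhile_cons, decide_true, if_true]
      cases hdw : t.dropWhile (fun c => decide (c = '0')) with
      | nil => rfl
      | cons x t' =>
        have hx : ¬ (x = '0') := by
          have hh := List.head?_dropWhile_not (fun c => decide (c = '0')) t
          rw [hdw] at hh; simpa using hh
        have hlt : t'.length + 1 ≤ t.length := by
          have hle := List.length_dropWhile_le (fun c => decide (c = '0')) t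
          rw [hdw] at hle; simpa using hle
        have hG : pvG 0 (x :: t') = pvG 0 t' := by simp [pvG, hx]
        have hrec := ih (x :: t') (by simp; omega)
        rw [hrec, hG]
        simp

-- ===== VERDICT (by name: the statement is the Claim_ definition above) =====
theorem count_zero_runs_spec : Claim_equal_count_zero_runs := by
  intro s _
  show count_zero_runs s = count_zero_runs_alt s
  unfold count_zero_runs count_zero_runs_alt
  rw [pvB_eq_pvG s.toList.length s.toList (le_refl _)]
  simpa using pvA_inv s.toList 0 []
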